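-- pv_equiv track=rewrite | github.com/vrijenattawar/n5-core | scripts/03_crm/safe_stakeholder_updater.py | _parse_profile_sections
-- ===== SOURCE A (Python) =====
-- from typing import Dict, List, Optional, Tuple
--
-- def _parse_profile_sections(content: str) -> Dict[str, str]:
--     """
--     Parse profile into sections for safe merging.
--     Returns dict mapping section headers to content.
--     """
--     sections = {}
--     current_section = "frontmatter"
--     current_content = []
--
--     lines = content.split('\n')
--
--     for line in lines:
--         # Detect section headers (## Section Name)
--         if line.startswith('## '):
--             # Save previous section
--             if current_content:
--                 sections[current_section] = '\n'.join(current_content)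
--
--             # Start new section
--             current_section = line[3:].strip()
--             current_content = [line]
--         else:
--             current_content.append(line)
--
--     # Save last section
--     if current_content:
--         sections[current_section] = '\n'.join(current_content)
--
--     return sections
-- ===== SOURCE B (Python) =====
-- def _parse_profile_sections(content: str):
--     """
--     Parse profile into sections for safe merging (block-splitting decomposition).
--     Returns dict mapping section headers to content.
--     """
--     lines = content.split('\n')
--
--     def split_block(ls):
--         """Return (run of non-header lines at the front, remainder)."""
--         for i, line in enumerate(ls):
--             if line.startswith('## '):
--                 return ls[:i], ls[i:]
--         return ls, []
--
--     sections = {}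
--     front, rest = split_block(lines)
--     if front:
--         sections['frontmatter'] = '\n'.join(front)
--     while rest:
--         header, rest = rest[0], rest[1:]
--         body, rest = split_block(rest)
--         sections[header[3:].strip()] = '\n'.join([header] + body)
--     return sections
-- ===== Notes on version B (the rewrite author's own statement) =====
-- stated objective: alternative
-- what changed: Replaced the single-pass accumulator-state scan (current_section/current_content mutated per line) with a block-splitting decomposition: a helper cuts the line list at the next header, the frontmatter slice is emitted once, then a loop consumes one whole header-led block per iteration.
import Mathlib
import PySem

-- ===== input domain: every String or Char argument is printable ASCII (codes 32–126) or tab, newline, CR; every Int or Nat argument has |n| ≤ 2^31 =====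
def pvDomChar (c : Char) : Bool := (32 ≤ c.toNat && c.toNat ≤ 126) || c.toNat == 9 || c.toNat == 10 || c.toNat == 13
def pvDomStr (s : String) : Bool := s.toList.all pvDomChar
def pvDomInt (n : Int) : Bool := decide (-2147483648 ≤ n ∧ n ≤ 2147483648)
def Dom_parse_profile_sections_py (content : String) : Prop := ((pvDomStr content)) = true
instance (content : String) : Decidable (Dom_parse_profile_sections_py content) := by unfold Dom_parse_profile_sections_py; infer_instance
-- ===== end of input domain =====

-- B replaces A's per-line accumulator scan with a block-splitting loop (alternative decomposition, same cost).

-- ===== PORT A =====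
-- one loop iteration of A: state = (sections, current_section, current_content)
def pvAStep (st : PySem.Dict String String × String × List String) (line : String) :
    PySem.Dict String String × String × List String :=
  if PySem.Str.startswith line "## " then
    let sections := if st.2.2 == [] then st.1
                    else st.1.insert st.2.1 (PySem.Str.join "\n" st.2.2)
    (sections, PySem.Str.strip (PySem.Str.slice line (some 3) none), [line])
  else
    (st.1, st.2.1, st.2.2 ++ [line])

-- the trailing "save last section" step of A
def pvAFinish (st : PySem.Dict String String × String × List String) : PySem.Dict String String :=
  if st.2.2 == [] then st.1 else st.1.insert st.2.1 (PySem.Str.join "\n" st.2.2)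

def parse_profile_sections_py (content : String) : List (String × String) :=
  -- content.split('\n'): split? with a non-empty separator always returns some
  let lines := (PySem.Str.split? content "\n").getD []
  (pvAFinish (lines.foldl pvAStep (PySem.Dict.empty, "frontmatter", []))).items

-- ===== PORT B =====
-- Source B's split_block: run of non-header lines at the front, and the remainder
def pvSplitBlock : List String → List String × List String
  | [] => ([], [])
  | l :: rest =>
    if PySem.Str.startswith l "## " then ([], l :: rest)
    else
      let p := pvSplitBlock rest
      (l :: p.1, p.2)

theorem pvSplitBlock_snd_length (ls : List String) : (pvSplitBlock ls).2.length ≤ ls.length := by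
  induction ls with
  | nil => simp [pvSplitBlock]
  | cons l rest ih =>
    simp only [pvSplitBlock]
    split
    · simp
    · simpa using Nat.le_succ_of_le ih

-- Source B's while loop: consume one header-led block per iteration
def pvBLoop (sections : PySem.Dict String String) : List String → PySem.Dict String String
  | [] => sections
  | h :: tail =>
    let p := pvSplitBlock tail
    pvBLoop (sections.insert (PySem.Str.strip (PySem.Str.slice h (some 3) none))
                             (PySem.Str.join "\n" (h :: p.1))) p.2
termination_by ls => ls.length
decreasing_by
  exact Nat.lt_succ_of_le (pvSplitBlock_snd_length tail)

def parse_profile_sections_py_alt (content : String) : List (String × String) :=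
  let lines := (PySem.Str.split? content "\n").getD []
  let p := pvSplitBlock lines
  let sections := if p.1 == [] then (PySem.Dict.empty : PySem.Dict String String)
                  else PySem.Dict.empty.insert "frontmatter" (PySem.Str.join "\n" p.1)
  (pvBLoop sections p.2).items

-- ===== PRECONDITION & SPEC =====
def Spec_parse_profile_sections_py (content : String) (out : List (String × String)) : Prop := out = parse_profile_sections_py_alt content
instance (content : String) (out : List (String × String)) : Decidable (Spec_parse_profile_sections_py content out) := by unfold Spec_parse_profile_sections_py; infer_instance

-- ===== CLAIM (what is proved, stated in full; the proofs are below) =====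
def Claim_equal_parse_profile_sections_py : Prop := ∀ (content : String), Dom_parse_profile_sections_py content → Spec_parse_profile_sections_py content (parse_profile_sections_py content)

-- ===== LEMMAS AND PROOFS =====

-- A's scan with a non-empty accumulator equals one pvBLoop-style block step
theorem pvA_fold_ne (ls : List String) :
    ∀ (d : PySem.Dict String String) (sec : String) (acc : List String), acc ≠ [] →
    pvAFinish (ls.foldl pvAStep (d, sec, acc)) =
      pvBLoop (d.insert sec (PySem.Str.join "\n" (acc ++ (pvSplitBlock ls).1))) (pvSplitBlock ls).2 := by
  induction ls with
  | nil =>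
    intro d sec acc hacc
    simp [pvAFinish, pvSplitBlock, pvBLoop, hacc]
  | cons l rest ih =>
    intro d sec acc hacc
    by_cases h : PySem.Str.startswith l "## "
    all_goals rw [PySem.Str.startswith_eq, show "## ".toList = ['#', '#', ' '] from rfl] at h
    · rw [List.foldl_cons]
      have hstep : pvAStep (d, sec, acc) l =
          (d.insert sec (PySem.Str.join "\n" acc),
           PySem.Str.strip (PySem.Str.slice l (some 3) none), [l]) := by
        simp [pvAStep, PySem.Str.startswith_eq, h, hacc]
      rw [hstep, ih _ _ [l] (by simp)]
      simp [pvSplitBlock, PySem.Str.startswith_eq, h, pvBLoop]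
    · rw [List.foldl_cons]
      have hstep : pvAStep (d, sec, acc) l = (d, sec, acc ++ [l]) := by
        simp [pvAStep, PySem.Str.startswith_eq, h]
      rw [hstep, ih _ _ (acc ++ [l]) (by simp)]
      simp [pvSplitBlock, PySem.Str.startswith_eq, h]
  
-- A's scan from the initial empty accumulator equals B's frontmatter step plus block loop
theorem pvA_fold_nil (ls : List String) (d : PySem.Dict String String) (sec : String) :
    pvAFinish (ls.foldl pvAStep (d, sec, [])) =
      pvBLoop (if (pvSplitBlock ls).1 == [] then d
               else d.insert sec (PySem.Str.join "\n" (pvSplitBlock ls).1)) (pvSplitBlock ls).2 := by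
  cases ls with
  | nil => simp [pvAFinish, pvSplitBlock, pvBLoop]
  | cons l rest =>
    by_cases h : PySem.Str.startswith l "## "
    all_goals rw [PySem.Str.startswith_eq, show "## ".toList = ['#', '#', ' '] from rfl] at h
    · rw [List.foldl_cons]
      have hstep : pvAStep (d, sec, []) l =
          (d, PySem.Str.strip (PySem.Str.slice l (some 3) none), [l]) := by
        simp [pvAStep, PySem.Str.startswith_eq, h]
      rw [hstep, pvA_fold_ne rest _ _ [l] (by simp)]
      simp [pvSplitBlock, PySem.Str.startswith_eq, h, pvBLoop]
    · rw [List.foldl_cons]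
      have hstep : pvAStep (d, sec, []) l = (d, sec, [l]) := by
        simp [pvAStep, PySem.Str.startswith_eq, h]
      rw [hstep, pvA_fold_ne rest _ _ [l] (by simp)]
      simp [pvSplitBlock, PySem.Str.startswith_eq, h]

-- ===== VERDICT (by name: the statement is the Claim_ definition above) =====
theorem parse_profile_sections_py_spec : Claim_equal_parse_profile_sections_py := by
  intro content _
  unfold Spec_parse_profile_sections_py parse_profile_sections_py parse_profile_sections_py_alt
  simp only [pvA_fold_nil]
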